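-- pv_equiv track=rewrite | github.com/just-yagodkin/public_demos | goodfunctions.py | smartedgesinterv
-- ===== SOURCE A (Python) =====
-- import copy
--
-- def smartedgesinterv(l: list, seed):
--     """seed 1:  X Y Z   ->   X Z Y
--        seed 2:  X Y Z   ->   Y X Z
--        seed 3:  X Y Z   ->   Y Z X
--        seed 4:  X Y Z   ->   Z X Y
--        seed 5:  X Y Z   ->   Z Y X
--     """
--     templ = copy.deepcopy(l)
--
--     if seed == 0 or l == [False]:
--         return templ
--
--     if seed == 1:
--         for d in templ:
--             d['data']['id'] = d['data']['id'].replace("Y", "z").replace("Z", "y").upper()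
--             d['data']['source'] = d['data']['source'].replace("Y", "z").replace("Z", "y").upper()
--             d['data']['target'] = d['data']['target'].replace("Y", "z").replace("Z", "y").upper()
--
--     if seed == 2:
--         for d in templ:
--             d['data']['id'] = d['data']['id'].replace("Y", "x").replace("X", "y").upper()
--             d['data']['source'] = d['data']['source'].replace("Y", "x").replace("X", "y").upper()
--             d['data']['target'] = d['data']['target'].replace("Y", "x").replace("X", "y").upper()
--
--     if seed == 4:
--         for d in templ:
--             d['data']['id'] = d['data']['id'].replace("X", "y").replace("Y", "z").replace("Z", "x").upper()
--             d['data']['source'] = d['data']['source'].replace("X", "y").replace("Y", "z").replace("Z", "x").upper()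
--             d['data']['target'] = d['data']['target'].replace("X", "y").replace("Y", "z").replace("Z", "x").upper()
--
--     if seed == 3:
--         for d in templ:
--             d['data']['id'] = d['data']['id'].replace("X", "z").replace("Y", "x").replace("Z", "y").upper()
--             d['data']['source'] = d['data']['source'].replace("X", "z").replace("Y", "x").replace("Z", "y").upper()
--             d['data']['target'] = d['data']['target'].replace("X", "z").replace("Y", "x").replace("Z", "y").upper()
--
--     if seed == 5:
--         for d in templ:
--             d['data']['id'] = d['data']['id'].replace("Z", "x").replace("X", "z").upper()
--             d['data']['source'] = d['data']['source'].replace("Z", "x").replace("X", "z").upper()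
--             d['data']['target'] = d['data']['target'].replace("Z", "x").replace("X", "z").upper()
--     return templ
-- ===== SOURCE B (Python) =====
-- import copy
--
-- # One translation table per seed: the net per-character effect of A's chained
-- # replaces (uppercase X/Y/Z permuted; everything else just uppercased afterwards).
-- _TABLES = {
--     1: str.maketrans("YZ", "ZY"),
--     2: str.maketrans("XY", "YX"),
--     3: str.maketrans("XYZ", "ZXY"),
--     4: str.maketrans("XYZ", "YZX"),
--     5: str.maketrans("XZ", "ZX"),
-- }
--
-- def smartedgesinterv(l: list, seed):
--     templ = copy.deepcopy(l)
--     if seed == 0 or l == [False]: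
--         return templ
--     table = _TABLES.get(seed)
--     if table is None:
--         return templ
--     for d in templ:
--         data = d['data']
--         for k in ('id', 'source', 'target'):
--             data[k] = data[k].translate(table).upper()
--     return templ
-- ===== Notes on version B (the rewrite author's own statement) =====
-- stated objective: simpler
-- what changed: Replaces the five copy-pasted chained-replace branches with a seed-indexed dict of precomputed per-character translation tables applied in a single loop over the three keys.
import Mathlib
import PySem

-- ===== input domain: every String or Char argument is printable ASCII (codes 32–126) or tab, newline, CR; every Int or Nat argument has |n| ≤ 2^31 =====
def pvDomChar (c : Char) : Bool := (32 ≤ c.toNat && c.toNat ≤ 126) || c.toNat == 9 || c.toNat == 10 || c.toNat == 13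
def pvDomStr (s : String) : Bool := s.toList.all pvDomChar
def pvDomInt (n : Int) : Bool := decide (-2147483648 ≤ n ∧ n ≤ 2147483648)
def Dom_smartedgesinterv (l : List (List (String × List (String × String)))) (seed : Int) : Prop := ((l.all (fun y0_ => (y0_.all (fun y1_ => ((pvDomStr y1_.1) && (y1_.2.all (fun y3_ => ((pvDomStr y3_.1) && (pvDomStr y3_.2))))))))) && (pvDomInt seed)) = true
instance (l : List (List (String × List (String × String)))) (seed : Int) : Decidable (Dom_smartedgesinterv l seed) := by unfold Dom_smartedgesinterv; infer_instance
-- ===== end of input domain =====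

-- B replaces A's five copy-pasted chained-replace branches by a seed-indexed table of
-- per-character translation maps applied in one loop (objective: simpler; same cost).
-- A's 'l == [False]' guard is vacuous for inputs of this type and is not ported.


-- ===== PORT A =====
-- d['data'][k] = f(d['data'][k]) : read then overwrite-in-place; 'none' = KeyError, excluded by Pre_
def pvSetA (f : String → String) (k : String) (data : PySem.Dict String String) : PySem.Dict String String :=
  match data.get? k with
  | some v => data.insert k (f v)
  | none => data

-- one iteration of A's 'for d in templ' body, with f the seed's string transform
def pvEdgeA (f : String → String) (d : List (String × List (String × String))) : List (String × List (String × String)) :=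
  let dd := PySem.Dict.mk d
  match dd.get? "data" with
  | some data0 =>
      let data := pvSetA f "id" (PySem.Dict.mk data0)
      let data := pvSetA f "source" data
      let data := pvSetA f "target" data
      (dd.insert "data" data.items).items
  | none => d

def pvA1 (s : String) : String := PySem.Str.upper (PySem.Str.replace (PySem.Str.replace s "Y" "z") "Z" "y")
def pvA2 (s : String) : String := PySem.Str.upper (PySem.Str.replace (PySem.Str.replace s "Y" "x") "X" "y")
def pvA4 (s : String) : String := PySem.Str.upper (PySem.Str.replace (PySem.Str.replace (PySem.Str.replace s "X" "y") "Y" "z") "Z" "x")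
def pvA3 (s : String) : String := PySem.Str.upper (PySem.Str.replace (PySem.Str.replace (PySem.Str.replace s "X" "z") "Y" "x") "Z" "y")
def pvA5 (s : String) : String := PySem.Str.upper (PySem.Str.replace (PySem.Str.replace s "Z" "x") "X" "z")

def smartedgesinterv (l : List (List (String × List (String × String)))) (seed : Int) : List (List (String × List (String × String))) :=
  let templ := l   -- deepcopy
  -- 'l == [False]' can never hold for a list of dicts; the guard reduces to 'seed == 0'
  if seed == 0 then templ
  else
    let templ := if seed == 1 then templ.map (pvEdgeA pvA1) else templ
    let templ := if seed == 2 then templ.map (pvEdgeA pvA2) else templ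
    let templ := if seed == 4 then templ.map (pvEdgeA pvA4) else templ
    let templ := if seed == 3 then templ.map (pvEdgeA pvA3) else templ
    let templ := if seed == 5 then templ.map (pvEdgeA pvA5) else templ
    templ

-- ===== PORT B =====
-- _TABLES: str.maketrans dicts, one per seed (char → char maps)
def pvTables : PySem.Dict Int (List (Char × Char)) :=
  PySem.Dict.mk [
    (1, [('Y','Z'),('Z','Y')]),
    (2, [('X','Y'),('Y','X')]),
    (3, [('X','Z'),('Y','X'),('Z','Y')]),
    (4, [('X','Y'),('Y','Z'),('Z','X')]),
    (5, [('X','Z'),('Z','X')])]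

-- s.translate(table).upper(): translate maps each char through the table (identity if absent)
def pvTranslateUpper (tbl : List (Char × Char)) (s : String) : String :=
  PySem.Str.upper (String.ofList (s.toList.map (fun c => ((tbl.lookup c).getD c))))

-- B's inner loop: for k in ('id','source','target'): data[k] = data[k].translate(table).upper()
def pvEdgeB (tbl : List (Char × Char)) (d : List (String × List (String × String))) : List (String × List (String × String)) :=
  let dd := PySem.Dict.mk d
  match dd.get? "data" with
  | some data0 =>
      let data := ["id", "source", "target"].foldl (fun data k =>
        match data.get? k with
        | some v => data.insert k (pvTranslateUpper tbl v)
        | none => data) (PySem.Dict.mk data0)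
      (dd.insert "data" data.items).items
  | none => d

def smartedgesinterv_alt (l : List (List (String × List (String × String)))) (seed : Int) : List (List (String × List (String × String))) :=
  let templ := l   -- deepcopy
  if seed == 0 then templ
  else
    match pvTables.get? seed with
    | none => templ
    | some tbl => templ.map (pvEdgeB tbl)

-- ===== PRECONDITION & SPEC =====
def pvHasKeys (d : List (String × List (String × String))) : Prop :=
  (PySem.Dict.mk d).contains "data" = true ∧
  (PySem.Dict.mk ((PySem.Dict.mk d).getD "data" [])).contains "id" = true ∧
  (PySem.Dict.mk ((PySem.Dict.mk d).getD "data" [])).contains "source" = true ∧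
  (PySem.Dict.mk ((PySem.Dict.mk d).getD "data" [])).contains "target" = true

-- For seeds 1–5 Python A raises KeyError unless every edge dict has key 'data'
-- whose value has keys 'id', 'source' and 'target'; other seeds never index.
def Pre_smartedgesinterv (l : List (List (String × List (String × String)))) (seed : Int) : Prop :=
  (seed = 1 ∨ seed = 2 ∨ seed = 3 ∨ seed = 4 ∨ seed = 5) → ∀ d ∈ l, pvHasKeys d
instance (l : List (List (String × List (String × String)))) (seed : Int) : Decidable (Pre_smartedgesinterv l seed) := by unfold Pre_smartedgesinterv pvHasKeys; infer_instance

def pvWitness_smartedgesinterv : (List (List (String × List (String × String)))) × Int :=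
  ([[("data", [("id", "XY1"), ("source", "X"), ("target", "yz")])]], 3)

def Spec_smartedgesinterv (l : List (List (String × List (String × String)))) (seed : Int) (out : List (List (String × List (String × String)))) : Prop := out = smartedgesinterv_alt l seed
instance (l : List (List (String × List (String × String)))) (seed : Int) (out : List (List (String × List (String × String)))) : Decidable (Spec_smartedgesinterv l seed out) := by unfold Spec_smartedgesinterv; infer_instance

-- ===== CLAIM (what is proved, stated in full; the proofs are below) =====
def Claim_equal_smartedgesinterv : Prop := ∀ (l : List (List (String × List (String × String)))) (seed : Int), Dom_smartedgesinterv l seed → Pre_smartedgesinterv l seed → Spec_smartedgesinterv l seed (smartedgesinterv l seed)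

-- ===== LEMMAS AND PROOFS =====

-- single-character replace is a character map
theorem replace_go_single (a b : Char) : ∀ (cs acc : List Char) (fuel : Nat), cs.length ≤ fuel →
    PySem.Chars.replace.go [a] [b] fuel cs acc =
      acc.reverse ++ cs.map (fun c => if c = a then b else c) := by
  intro cs
  induction cs with
  | nil =>
      intro acc fuel _
      cases fuel <;> simp [PySem.Chars.replace.go]
  | cons c t ih =>
      intro acc fuel hf
      cases fuel with
      | zero => simp at hf
      | succ n =>
          have ht : t.length ≤ n := by simpa using hf
          by_cases hc : c = a
          · subst hc
            have hpre : [c].isPrefixOf (c :: t) = true := by simp [List.isPrefixOf]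
            simp only [PySem.Chars.replace.go, hpre, if_true, List.length_cons,
              List.length_nil, List.drop_succ_cons, List.drop_zero]
            rw [ih _ _ ht]
            simp
          · have hpre : [a].isPrefixOf (c :: t) = false := by
              simp [List.isPrefixOf]; exact fun h => absurd h.symm hc
            simp only [PySem.Chars.replace.go, hpre]
            rw [if_neg (by simp), ih _ _ ht]
            simp [hc]

theorem replace_single (a b : Char) (cs : List Char) :
    PySem.Chars.replace cs [a] [b] = cs.map (fun c => if c = a then b else c) := by
  unfold PySem.Chars.replace
  rw [if_neg (by simp)]
  simpa using replace_go_single a b cs [] cs.length le_rfl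

-- each of A's chained-replace-then-upper transforms IS B's translate-then-upper
theorem pvA1_eq : pvA1 = pvTranslateUpper [('Y','Z'),('Z','Y')] := by
  funext s
  apply String.ext
  simp only [pvA1, pvTranslateUpper, PySem.Str.upper, PySem.Str.replace, String.toList_ofList,
    show "Y".toList = ['Y'] from rfl, show "Z".toList = ['Z'] from rfl, show "y".toList = ['y'] from rfl, show "z".toList = ['z'] from rfl,
    replace_single, List.map_map]
  unfold PySem.Chars.upper
  simp only [List.map_map]
  refine List.map_congr_left (fun c _ => ?_)
  by_cases h1 : c = 'Y'
  · subst h1; decide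
  by_cases h2 : c = 'Z'
  · subst h2; decide
  simp [Function.comp, List.lookup, h1, h2,
      show (c == 'Y') = false from by simpa using h1,
      show (c == 'Z') = false from by simpa using h2]

theorem pvA2_eq : pvA2 = pvTranslateUpper [('X','Y'),('Y','X')] := by
  funext s
  apply String.ext
  simp only [pvA2, pvTranslateUpper, PySem.Str.upper, PySem.Str.replace, String.toList_ofList,
    show "X".toList = ['X'] from rfl, show "Y".toList = ['Y'] from rfl, show "x".toList = ['x'] from rfl, show "y".toList = ['y'] from rfl,
    replace_single, List.map_map]
  unfold PySem.Chars.upper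
  simp only [List.map_map]
  refine List.map_congr_left (fun c _ => ?_)
  by_cases h1 : c = 'X'
  · subst h1; decide
  by_cases h2 : c = 'Y'
  · subst h2; decide
  simp [Function.comp, List.lookup, h1, h2,
      show (c == 'X') = false from by simpa using h1,
      show (c == 'Y') = false from by simpa using h2]

theorem pvA3_eq : pvA3 = pvTranslateUpper [('X','Z'),('Y','X'),('Z','Y')] := by
  funext s
  apply String.ext
  simp only [pvA3, pvTranslateUpper, PySem.Str.upper, PySem.Str.replace, String.toList_ofList,
    show "X".toList = ['X'] from rfl, show "Y".toList = ['Y'] from rfl, show "Z".toList = ['Z'] from rfl, show "x".toList = ['x'] from rfl, show "y".toList = ['y'] from rfl, show "z".toList = ['z'] from rfl,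
    replace_single, List.map_map]
  unfold PySem.Chars.upper
  simp only [List.map_map]
  refine List.map_congr_left (fun c _ => ?_)
  by_cases h1 : c = 'X'
  · subst h1; decide
  by_cases h2 : c = 'Y'
  · subst h2; decide
  by_cases h3 : c = 'Z'
  · subst h3; decide
  simp [Function.comp, List.lookup, h1, h2, h3,
      show (c == 'X') = false from by simpa using h1,
      show (c == 'Y') = false from by simpa using h2,
      show (c == 'Z') = false from by simpa using h3]

theorem pvA4_eq : pvA4 = pvTranslateUpper [('X','Y'),('Y','Z'),('Z','X')] := by
  funext s
  apply String.ext
  simp only [pvA4, pvTranslateUpper, PySem.Str.upper, PySem.Str.replace, String.toList_ofList,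
    show "X".toList = ['X'] from rfl, show "Y".toList = ['Y'] from rfl, show "Z".toList = ['Z'] from rfl, show "x".toList = ['x'] from rfl, show "y".toList = ['y'] from rfl, show "z".toList = ['z'] from rfl,
    replace_single, List.map_map]
  unfold PySem.Chars.upper
  simp only [List.map_map]
  refine List.map_congr_left (fun c _ => ?_)
  by_cases h1 : c = 'X'
  · subst h1; decide
  by_cases h2 : c = 'Y'
  · subst h2; decide
  by_cases h3 : c = 'Z'
  · subst h3; decide
  simp [Function.comp, List.lookup, h1, h2, h3,
      show (c == 'X') = false from by simpa using h1,
      show (c == 'Y') = false from by simpa using h2,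
      show (c == 'Z') = false from by simpa using h3]

theorem pvA5_eq : pvA5 = pvTranslateUpper [('X','Z'),('Z','X')] := by
  funext s
  apply String.ext
  simp only [pvA5, pvTranslateUpper, PySem.Str.upper, PySem.Str.replace, String.toList_ofList,
    show "X".toList = ['X'] from rfl, show "Z".toList = ['Z'] from rfl, show "x".toList = ['x'] from rfl, show "z".toList = ['z'] from rfl,
    replace_single, List.map_map]
  unfold PySem.Chars.upper
  simp only [List.map_map]
  refine List.map_congr_left (fun c _ => ?_)
  by_cases h1 : c = 'X'
  · subst h1; decide
  by_cases h2 : c = 'Z'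
  · subst h2; decide
  simp [Function.comp, List.lookup, h1, h2,
      show (c == 'X') = false from by simpa using h1,
      show (c == 'Z') = false from by simpa using h2]

-- B's fold over the three keys is A's three explicit updates
theorem pvEdgeB_eq (tbl : List (Char × Char)) :
    pvEdgeB tbl = pvEdgeA (pvTranslateUpper tbl) := by
  funext d
  simp only [pvEdgeA, pvEdgeB, pvSetA, List.foldl]

theorem smartedgesinterv_eq_alt (l : List (List (String × List (String × String)))) (seed : Int) :
    smartedgesinterv l seed = smartedgesinterv_alt l seed := by
  by_cases h0 : seed = 0
  · simp [smartedgesinterv, smartedgesinterv_alt, h0]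
  · by_cases h1 : seed = 1
    · subst h1
      simp [smartedgesinterv, smartedgesinterv_alt, pvTables, PySem.Dict.get?,
        pvEdgeB_eq, pvA1_eq]
    · by_cases h2 : seed = 2
      · subst h2
        simp [smartedgesinterv, smartedgesinterv_alt, pvTables, PySem.Dict.get?,
          pvEdgeB_eq, pvA2_eq]
      · by_cases h3 : seed = 3
        · subst h3
          simp [smartedgesinterv, smartedgesinterv_alt, pvTables, PySem.Dict.get?,
            pvEdgeB_eq, pvA3_eq]
        · by_cases h4 : seed = 4
          · subst h4
            simp [smartedgesinterv, smartedgesinterv_alt, pvTables, PySem.Dict.get?,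
              pvEdgeB_eq, pvA4_eq]
          · by_cases h5 : seed = 5
            · subst h5
              simp [smartedgesinterv, smartedgesinterv_alt, pvTables, PySem.Dict.get?,
                pvEdgeB_eq, pvA5_eq]
            · simp [smartedgesinterv, smartedgesinterv_alt, pvTables, PySem.Dict.get?,
                List.find?, h0, h1, h2, h3, h4, h5,
                show ((1:Int) == seed) = false from beq_eq_false_iff_ne.mpr (by omega),
                show ((2:Int) == seed) = false from beq_eq_false_iff_ne.mpr (by omega),
                show ((3:Int) == seed) = false from beq_eq_false_iff_ne.mpr (by omega),
                show ((4:Int) == seed) = false from beq_eq_false_iff_ne.mpr (by omega),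
                show ((5:Int) == seed) = false from beq_eq_false_iff_ne.mpr (by omega)]

-- ===== VERDICT (by name: the statement is the Claim_ definition above) =====
theorem smartedgesinterv_spec : Claim_equal_smartedgesinterv := by
  intro l seed _dom _pre
  unfold Spec_smartedgesinterv
  exact smartedgesinterv_eq_alt l seed
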